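-- pv_equiv track=rewrite | github.com/nilerrors/IP | week4_vr/vraag11.py | minimum_elements
-- ===== SOURCE A (Python) =====
-- def minimum_elements(l):
--     kleinste = l[0]
--     aantal_keer = 1
--     for i in range(1, len(l)):
--         if kleinste > l[i]:
--             kleinste = l[i]
--             aantal_keer = 1
--         elif kleinste == l[i]:
--             aantal_keer += 1
--     return kleinste, aantal_keer
-- ===== SOURCE B (Python) =====
-- def minimum_elements(l):
--     # two separate passes: min-scan seeded by l[0], then count that minimum
--     kleinste = l[0]
--     for x in l[1:]:
--         if x < kleinste:
--             kleinste = x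
--     aantal_keer = l.count(kleinste)
--     return kleinste, aantal_keer
-- ===== Notes on version B (the rewrite author's own statement) =====
-- stated objective: simpler
-- what changed: A's single fused loop maintaining (min, count) state is replaced by two independent passes: a plain min-scan over the tail followed by l.count(min).
import Mathlib
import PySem

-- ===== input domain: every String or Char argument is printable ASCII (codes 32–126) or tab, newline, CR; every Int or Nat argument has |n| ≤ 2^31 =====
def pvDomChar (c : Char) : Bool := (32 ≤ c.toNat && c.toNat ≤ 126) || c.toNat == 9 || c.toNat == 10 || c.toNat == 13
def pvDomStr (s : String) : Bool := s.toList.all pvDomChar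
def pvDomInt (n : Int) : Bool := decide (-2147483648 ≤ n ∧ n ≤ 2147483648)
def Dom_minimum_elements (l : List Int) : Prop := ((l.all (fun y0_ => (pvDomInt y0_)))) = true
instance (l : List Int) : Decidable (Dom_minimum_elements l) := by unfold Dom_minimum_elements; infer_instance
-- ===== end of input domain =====

-- B replaces A's single fused loop carrying (min, count) state by two independent
-- passes: a plain min-scan over the tail, then counting that minimum (simpler).

-- ===== PORT A =====
-- A's loop 'for i in range(1, len(l))' reads l[i] for i = 1 .. len-1, i.e. it
-- traverses the tail of the list in order; ported as a foldl over the tail with the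
-- same (kleinste, aantal_keer) state and the same branch order.
def minimum_elements (l : List Int) : Int × Int :=
  match l with
  | [] => (0, 0)   -- the first-element access raises IndexError on the empty list; excluded by Pre_
  | h :: t =>
    t.foldl (fun s x =>
      if s.1 > x then (x, 1)
      else if s.1 = x then (s.1, s.2 + 1)
      else s) (h, 1)

-- ===== PORT B =====
def minimum_elements_alt (l : List Int) : Int × Int :=
  match l with
  | [] => (0, 0)   -- the first-element access raises IndexError on the empty list; excluded by Pre_
  | h :: t =>
    let kleinste := t.foldl (fun m x => if x < m then x else m) h
    (kleinste, ((PySem.List.count l kleinste : Nat) : Int))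

-- ===== PRECONDITION & SPEC =====
-- Pre_ excludes only the empty list, on which both Pythons raise IndexError.
def Pre_minimum_elements (l : List Int) : Prop := l ≠ []
instance (l : List Int) : Decidable (Pre_minimum_elements l) := by unfold Pre_minimum_elements; infer_instance
def pvWitness_minimum_elements : List Int := [3, 1, 1, 2]

def Spec_minimum_elements (l : List Int) (out : Int × Int) : Prop := out = minimum_elements_alt l
instance (l : List Int) (out : Int × Int) : Decidable (Spec_minimum_elements l out) := by unfold Spec_minimum_elements; infer_instance

-- ===== CLAIM (what is proved, stated in full; the proofs are below) =====
def Claim_equal_minimum_elements : Prop := ∀ (l : List Int), Dom_minimum_elements l → Pre_minimum_elements l → Spec_minimum_elements l (minimum_elements l)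

-- ===== LEMMAS AND PROOFS =====

-- the min-scan never exceeds its seed
theorem foldl_min_le_seed (t : List Int) (k : Int) :
    t.foldl (fun m x => if x < m then x else m) k ≤ k := by
  induction t generalizing k with
  | nil => simp
  | cons x t ih =>
    simp only [List.foldl_cons]
    split
    · exact le_trans (ih x) (le_of_lt (by assumption))
    · exact ih k

-- invariant of A's fused loop: the state (k, c) evolves to the running minimum,
-- paired with c (if the minimum never dropped below k) plus the count of the
-- minimum among the traversed elements
theorem fused_inv (t : List Int) (k c : Int) :
    t.foldl (fun s x =>
      if s.1 > x then (x, 1)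
      else if s.1 = x then (s.1, s.2 + 1)
      else s) (k, c)
    = (t.foldl (fun m x => if x < m then x else m) k,
       (if t.foldl (fun m x => if x < m then x else m) k = k then c else 0)
         + (t.count (t.foldl (fun m x => if x < m then x else m) k) : Int)) := by
  induction t generalizing k c with
  | nil => simp
  | cons x t ih =>
    simp only [List.foldl_cons, List.count_cons, gt_iff_lt]
    by_cases hlt : x < k
    · simp only [hlt, if_pos, ih]
      have hm := foldl_min_le_seed t x
      refine Prod.ext rfl ?_
      simp only [beq_iff_eq]
      push_cast
      split_ifs <;> omega
    · have hk : (if x < k then x else k) = k := if_neg hlt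
      simp only [hk]
      have hm := foldl_min_le_seed t k
      by_cases heq : k = x
      · simp only [if_neg hlt, if_pos heq, ih]
        refine Prod.ext rfl ?_
        simp only [beq_iff_eq]
        push_cast
        split_ifs <;> omega
      · simp only [if_neg hlt, if_neg heq, ih]
        refine Prod.ext rfl ?_
        simp only [beq_iff_eq]
        push_cast
        split_ifs <;> omega

-- ===== VERDICT (by name: the statement is the Claim_ definition above) =====
theorem minimum_elements_spec : Claim_equal_minimum_elements := by
  intro l _hdom hpre
  unfold Spec_minimum_elements minimum_elements minimum_elements_alt
  match l with
  | [] => exact absurd rfl hpre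
  | h :: t =>
    simp only [fused_inv, PySem.List.count_eq]
    have hm := foldl_min_le_seed t h
    set m := t.foldl (fun m x => if x < m then x else m) h with hmdef
    simp only [List.count_cons, beq_iff_eq]
    refine Prod.ext rfl ?_
    push_cast
    split_ifs <;> omega
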